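-- pv_equiv track=rewrite | github.com/Gjiha/Universita | Primo anno/Programmazione/programi vscode/programmi_python/esercizi.py | muted_by_freq
-- ===== SOURCE A (Python) =====
-- def muted_by_freq(l):
--     d = {}
--     i = 0
--
--     if len(l) == 0 or len(l) == 1:
--         return l
--
--     for c in l:
--         d[c] = d.get(c,0) + 1
--
--     sort_dict = sorted(d.keys(), key= lambda x: d[x])
--
--     for c in sort_dict:
--         t = 0
--         while t < d[c]:
--             l[i] = c
--             i += 1
--             t += 1
--     return l
-- ===== SOURCE B (Python) =====
-- def muted_by_freq(l):
--     # Bucket pass instead of sorting: count once, group the distinct values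
--     # (in first-occurrence order) into buckets keyed by their frequency, then
--     # emit the buckets in increasing frequency. Mutates l in place like the
--     # original, and returns it.
--     if len(l) <= 1:
--         return l
--     cnt = {}
--     for c in l:
--         cnt[c] = cnt.get(c, 0) + 1
--     buckets = {}
--     for k in cnt:
--         f = cnt[k]
--         if f in buckets:
--             buckets[f].append(k)
--         else:
--             buckets[f] = [k]
--     out = []
--     for f in range(1, len(l) + 1):
--         for k in buckets.get(f, []):
--             out.extend([k] * f)
--     l[:] = out
--     return l
-- ===== Notes on version B (the rewrite author's own statement) =====
-- stated objective: alternative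
-- what changed: B replaces A's comparison sort of the distinct values by their frequency with a counting/bucket pass: each distinct value (in first-occurrence order) goes into the bucket of its frequency and buckets are emitted in increasing frequency, giving the same stable order without sorting.
import Mathlib
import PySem

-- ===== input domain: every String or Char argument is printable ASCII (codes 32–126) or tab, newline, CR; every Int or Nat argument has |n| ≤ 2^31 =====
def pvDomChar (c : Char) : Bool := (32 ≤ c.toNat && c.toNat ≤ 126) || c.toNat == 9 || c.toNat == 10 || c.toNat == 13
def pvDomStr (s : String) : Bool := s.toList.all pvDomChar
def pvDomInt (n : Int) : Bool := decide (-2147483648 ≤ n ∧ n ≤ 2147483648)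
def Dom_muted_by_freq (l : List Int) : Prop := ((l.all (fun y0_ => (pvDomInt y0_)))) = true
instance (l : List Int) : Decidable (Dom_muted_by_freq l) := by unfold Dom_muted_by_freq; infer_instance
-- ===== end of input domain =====

-- B replaces A's key-sort of the distinct values by a counting/bucket pass over the
-- frequencies; both A and B mutate the argument list in place and return it — the
-- theorem is about the (identical) returned value.

-- ===== PORT A =====
-- the 'while t < d[c]: l[i] = c; i += 1; t += 1' loop; s = (l, i); 'l[i] = c' is pySetD,
-- exact because i stays in range (the writes total len(l); proved in the lemmas below)
def fillA (dc c : Int) (t : Int) (s : List Int × Int) : List Int × Int :=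
  if h : t < dc then fillA dc c (t + 1) (PySem.List.pySetD s.1 s.2 c, s.2 + 1) else s
termination_by (dc - t).toNat
decreasing_by omega

def muted_by_freq (l : List Int) : List Int :=
  if l.length = 0 ∨ l.length = 1 then l
  else
    -- for c in l: d[c] = d.get(c,0) + 1
    let d := l.foldl (fun d c => d.insert c (d.getD c 0 + 1)) (PySem.Dict.empty : PySem.Dict Int Int)
    -- d[x] in the sort key is exact as getD: every x sorted here is a key of d
    let sort_dict := PySem.List.sorted d.keys (fun x => d.getD x 0)
    (sort_dict.foldl (fun s c => fillA (d.getD c 0) c 0 s) (l, 0)).1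

-- ===== PORT B =====
def muted_by_freq_alt (l : List Int) : List Int :=
  if l.length ≤ 1 then l
  else
    let cnt := l.foldl (fun d c => d.insert c (d.getD c 0 + 1)) (PySem.Dict.empty : PySem.Dict Int Int)
    -- for k in cnt: f = cnt[k]; append k to buckets[f], creating the bucket if absent
    -- (the if/else is exactly Dict.modify f [] (· ++ [k]); cnt[k] exact as getD: k is a key)
    let buckets := cnt.keys.foldl
      (fun bs k => bs.modify (cnt.getD k 0) [] (· ++ [k])) (PySem.Dict.empty : PySem.Dict Int (List Int))
    -- out = []; for f in range(1, len(l)+1): for k in buckets.get(f, []): out.extend([k] * f); l[:] = out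
    (PySem.List.pyRange 1 ((l.length : Int) + 1) 1).foldl
      (fun out f => (buckets.getD f []).foldl (fun out k => out ++ PySem.List.pyRepeat [k] f) out) []

-- ===== PRECONDITION & SPEC =====
def Spec_muted_by_freq (l : List Int) (out : List Int) : Prop := out = muted_by_freq_alt l
instance (l : List Int) (out : List Int) : Decidable (Spec_muted_by_freq l out) := by unfold Spec_muted_by_freq; infer_instance

-- ===== CLAIM (what is proved, stated in full; the proofs are below) =====
def Claim_equal_muted_by_freq : Prop := ∀ (l : List Int), Dom_muted_by_freq l → Spec_muted_by_freq l (muted_by_freq l)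

-- ===== LEMMAS AND PROOFS =====

-- A's counting loop is Counter (definitional)
theorem countFold_eq_counter (l : List Int) :
    l.foldl (fun d c => d.insert c (d.getD c 0 + 1)) (PySem.Dict.empty : PySem.Dict Int Int)
      = PySem.Dict.counter l := rfl

theorem set_length_append (A R : List Int) (r c : Int) :
    (A ++ r :: R).set A.length c = A ++ c :: R := by
  induction A with
  | nil => rfl
  | cons a t ih => simp [ih]

-- the inner while loop writes m copies of c at the next m positions
theorem fillA_spec (c : Int) (m : Nat) : ∀ (t : Int) (A R : List Int), m ≤ R.length →
    fillA (t + m) c t (A ++ R, (A.length : Int)) =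
      (A ++ List.replicate m c ++ R.drop m, (A.length : Int) + m) := by
  induction m with
  | zero =>
    intro t A R _
    rw [fillA]
    simp
  | succ m ih =>
    intro t A R h
    rw [fillA]
    have ht : t < t + ((m + 1 : Nat) : Int) := by push_cast; omega
    rw [dif_pos ht]
    cases R with
    | nil => simp at h
    | cons r R' =>
      have hset : PySem.List.pySetD (A ++ r :: R') ((A.length : Nat) : Int) c
          = A ++ c :: R' := by
        rw [PySem.List.pySetD_of_nonneg _ c (by positivity)]
        simpa using set_length_append A R' r c
      have hrw : (t + ((m + 1 : Nat) : Int)) = (t + 1) + (m : Nat) := by push_cast; ring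
      have hA : ((A.length : Int) + 1) = (((A ++ [c]).length : Nat) : Int) := by
        simp
      simp only [hset, hrw, hA]
      have hAc : A ++ c :: R' = (A ++ [c]) ++ R' := by simp
      rw [hAc, ih (t + 1) (A ++ [c]) R' (by simpa using h)]
      simp [List.replicate_succ]
      omega

-- the outer fold over the sorted keys concatenates the replicate blocks
theorem foldFill_spec (l : List Int) : ∀ (ks A R : List Int),
    (ks.map (fun c => l.count c)).sum ≤ R.length →
    ks.foldl (fun s c => fillA ((l.count c : Int)) c 0 s) (A ++ R, (A.length : Int)) =
      (A ++ ks.flatMap (fun c => List.replicate (l.count c) c)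
         ++ R.drop ((ks.map (fun c => l.count c)).sum),
       ((A.length : Int) + (ks.map (fun c => l.count c)).sum)) := by
  intro ks
  induction ks with
  | nil => intro A R _; simp
  | cons k ks ih =>
    intro A R h
    simp only [List.foldl_cons, List.map_cons, List.sum_cons] at *
    have hstep := fillA_spec k (l.count k) 0 A R (by omega)
    rw [show ((0 : Int) + (l.count k : Nat)) = ((l.count k : Nat) : Int) from by ring] at hstep
    rw [hstep]
    have hA : ((A.length : Int) + (l.count k : Nat))
        = (((A ++ List.replicate (l.count k) k).length : Nat) : Int) := by simp
    rw [hA, show A ++ List.replicate (l.count k) k ++ R.drop (l.count k)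
        = (A ++ List.replicate (l.count k) k) ++ R.drop (l.count k) from by simp,
      ih (A ++ List.replicate (l.count k) k) (R.drop (l.count k)) (by simp; omega)]
    simp [List.drop_drop]
    push_cast; ring

-- sum of multiplicities over the distinct elements is the length
theorem sum_counts (l : List Int) :
    ((PySem.Set.ofList l).map (fun c => l.count c)).sum = l.length := by
  have hperm : (PySem.Set.ofList l).Perm l.dedup := by
    rw [List.perm_ext_iff_of_nodup (PySem.Set.nodup_ofList l) (List.nodup_dedup l)]
    intro a; rw [PySem.Set.mem_ofList, List.mem_dedup]
  calc ((PySem.Set.ofList l).map (fun c => l.count c)).sum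
      = (l.dedup.map (fun c => l.count c)).sum := (hperm.map _).sum_eq
    _ = l.length := by simpa using List.sum_map_count_dedup_eq_length l

theorem flatMap_congr_mem (r : List Int) (g h : Int → List Int)
    (hgh : ∀ f ∈ r, g f = h f) : r.flatMap g = r.flatMap h := by
  induction r with
  | nil => rfl
  | cons a t ih =>
    simp only [List.flatMap_cons, hgh a (by simp)]
    rw [ih (fun f hf => hgh f (by simp [hf]))]

theorem insertBy_cons (before : Int → Int → Bool) (x y : Int) (ys : List Int) :
    PySem.List.insertBy before x (y :: ys)
      = if before x y then x :: y :: ys else y :: PySem.List.insertBy before x ys := rfl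

-- insertBy walks past a prefix it does not insert into
theorem insertBy_append_left (before : Int → Int → Bool) (x : Int) (l1 l2 : List Int)
    (h : ∀ y ∈ l1, before x y = false) :
    PySem.List.insertBy before x (l1 ++ l2) = l1 ++ PySem.List.insertBy before x l2 := by
  induction l1 with
  | nil => simp
  | cons a t ih =>
    simp only [List.cons_append, insertBy_cons, h a (by simp)]
    simp only [Bool.false_eq_true, if_false]
    rw [ih (fun y hy => h y (by simp [hy]))]

-- insertBy goes in front of a list all of whose elements come strictly later
theorem insertBy_all_before (before : Int → Int → Bool) (x : Int) (l2 : List Int)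
    (h : ∀ y ∈ l2, before x y = true) :
    PySem.List.insertBy before x l2 = x :: l2 := by
  cases l2 with
  | nil => rfl
  | cons a t => rw [insertBy_cons, if_pos (h a (by simp))]

-- THE STABLE-SORT/BUCKET THEOREM: a stable sort by an integer key with values in [a,b)
-- is the concatenation, over f = a…b-1, of the elements with key f in original order.
theorem sorted_eq_buckets (key : Int → Int) (a b : Int) :
    ∀ (ks : List Int), (∀ k ∈ ks, a ≤ key k ∧ key k < b) →
    PySem.List.sorted ks key =
      (PySem.List.pyRange a b 1).flatMap (fun f => ks.filter (fun k => key k == f)) := by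
  intro ks
  induction ks using List.reverseRecOn with
  | nil => simp [PySem.List.sorted_eq_foldl_insertBy, List.flatMap_eq_nil_iff]
  | append_singleton ks x ih =>
    intro hmem
    have hx : a ≤ key x ∧ key x < b := hmem x (by simp)
    have hks : ∀ k ∈ ks, a ≤ key k ∧ key k < b := fun k hk => hmem k (by simp [hk])
    have hL : PySem.List.sorted (ks ++ [x]) key
        = PySem.List.insertBy (fun p q => decide (key p < key q)) x (PySem.List.sorted ks key) := by
      rw [PySem.List.sorted_eq_foldl_insertBy, PySem.List.sorted_eq_foldl_insertBy,
        List.foldl_append]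
      rfl
    rw [hL, ih hks]
    have hsplit : PySem.List.pyRange a b 1
        = PySem.List.pyRange a (key x) 1 ++ (key x :: PySem.List.pyRange (key x + 1) b 1) := by
      rw [PySem.List.pyRange_one_append a (key x) b hx.1 (le_of_lt hx.2),
        PySem.List.pyRange_one_cons hx.2]
    rw [hsplit]
    simp only [List.flatMap_append, List.flatMap_cons]
    set P1 := (PySem.List.pyRange a (key x) 1).flatMap (fun f => ks.filter (fun k => key k == f)) with hP1
    set P2 := ks.filter (fun k => key k == key x) with hP2
    set P3 := (PySem.List.pyRange (key x + 1) b 1).flatMap (fun f => ks.filter (fun k => key k == f)) with hP3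
    have h12 : ∀ y ∈ P1 ++ P2, (decide (key x < key y)) = false := by
      intro y hy
      rcases List.mem_append.1 hy with hy | hy
      · rcases List.mem_flatMap.1 hy with ⟨f, hf, hyf⟩
        have hfb := PySem.List.mem_pyRange_one.1 hf
        have : key y = f := by simpa using (List.mem_filter.1 hyf).2
        simp [this]; omega
      · have : key y = key x := by simpa using (List.mem_filter.1 hy).2
        simp [this]
    have h3 : ∀ y ∈ P3, (decide (key x < key y)) = true := by
      intro y hy
      rcases List.mem_flatMap.1 hy with ⟨f, hf, hyf⟩
      have hfb := PySem.List.mem_pyRange_one.1 hf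
      have : key y = f := by simpa using (List.mem_filter.1 hyf).2
      simp [this]; omega
    have hfilt1 : ∀ f ∈ PySem.List.pyRange a (key x) 1,
        (ks ++ [x]).filter (fun k => key k == f) = ks.filter (fun k => key k == f) := by
      intro f hf
      have hfb := PySem.List.mem_pyRange_one.1 hf
      rw [List.filter_append]
      have : key x ≠ f := by omega
      simp [this]
    have hfilt3 : ∀ f ∈ PySem.List.pyRange (key x + 1) b 1,
        (ks ++ [x]).filter (fun k => key k == f) = ks.filter (fun k => key k == f) := by
      intro f hf
      have hfb := PySem.List.mem_pyRange_one.1 hf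
      rw [List.filter_append]
      have : key x ≠ f := by omega
      simp [this]
    have hfilt2 : (ks ++ [x]).filter (fun k => key k == key x) = P2 ++ [x] := by
      rw [List.filter_append]; simp [hP2]
    rw [show P1 ++ (P2 ++ P3) = (P1 ++ P2) ++ P3 from by simp,
      insertBy_append_left _ _ _ _ h12, insertBy_all_before _ _ _ h3,
      flatMap_congr_mem _ _ _ hfilt1, flatMap_congr_mem _ _ _ hfilt3, hfilt2]
    rw [← hP1, ← hP3]
    simp only [List.append_assoc, List.singleton_append]

-- the bucket-filling loop, pointwise
theorem buckets_getD (cnt : Int → Int) (ks : List Int) (f : Int) :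
    (ks.foldl (fun bs k => PySem.Dict.modify bs (cnt k) [] (· ++ [k]))
        (PySem.Dict.empty : PySem.Dict Int (List Int))).getD f []
      = ks.filter (fun k => cnt k == f) := by
  have h1 : ks.foldl (fun bs k => PySem.Dict.modify bs (cnt k) [] (· ++ [k]))
      (PySem.Dict.empty : PySem.Dict Int (List Int))
      = (ks.map (fun k => (cnt k, k))).foldl
          (fun d p => PySem.Dict.modify d p.1 [] (· ++ [p.2])) PySem.Dict.empty := by
    rw [List.foldl_map]
  rw [h1, PySem.Dict.getD_foldl_modify_append]
  simp [List.filter_map, Function.comp_def]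

theorem muted_by_freq_spec : Claim_equal_muted_by_freq := by
  unfold Claim_equal_muted_by_freq Spec_muted_by_freq
  intro l _
  by_cases hl : l.length = 0 ∨ l.length = 1
  · simp only [muted_by_freq, muted_by_freq_alt, if_pos hl,
      if_pos (show l.length ≤ 1 by omega)]
  · simp only [muted_by_freq, muted_by_freq_alt, if_neg hl,
      if_neg (show ¬ l.length ≤ 1 by omega)]
    simp only [countFold_eq_counter, PySem.Dict.keys_counter, PySem.Dict.getD_counter]
    -- shared facts
    have hmemK : ∀ k ∈ PySem.Set.ofList l, k ∈ l := fun k hk => (PySem.Set.mem_ofList l k).1 hk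
    have hbound : ∀ k ∈ PySem.Set.ofList l,
        1 ≤ (List.count k l : Int) ∧ (List.count k l : Int) ≤ (l.length : Int) := by
      intro k hk
      have h1 : 0 < List.count k l := List.count_pos_iff.2 (hmemK k hk)
      have h2 : List.count k l ≤ l.length := List.count_le_length
      constructor <;> push_cast <;> omega
    -- ===== A side: the fill loop concatenates the replicate blocks =====
    have hsum : ((PySem.List.sorted (PySem.Set.ofList l)
        (fun x : Int => ((List.count x l : Nat) : Int))).map (fun c => List.count c l)).sum
        = l.length := by
      have hperm := PySem.List.sorted_perm (PySem.Set.ofList l)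
        (fun x : Int => ((List.count x l : Nat) : Int)) false
      rw [(hperm.map _).sum_eq]
      exact sum_counts l
    have hA : ((PySem.List.sorted (PySem.Set.ofList l)
          (fun x : Int => ((List.count x l : Nat) : Int))).foldl
          (fun s c => fillA ((List.count c l : Nat) : Int) c 0 s) (l, 0)).1
        = (PySem.List.sorted (PySem.Set.ofList l)
            (fun x : Int => ((List.count x l : Nat) : Int))).flatMap
            (fun c => List.replicate (List.count c l) c) := by
      have h0 : ((l, (0 : Int)) : List Int × Int)
          = (([] : List Int) ++ l, ((([] : List Int)).length : Int)) := by simp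
      rw [h0, foldFill_spec l _ [] l (by rw [hsum])]
      simp [hsum]
    rw [hA]
    -- ===== B side =====
    simp only [PySem.List.foldl_append_eq_flatMap, List.nil_append]
    -- the two flatMaps agree bucket by bucket
    rw [sorted_eq_buckets (fun x : Int => ((List.count x l : Nat) : Int)) 1
        ((l.length : Int) + 1) (PySem.Set.ofList l)
        (fun k hk => ⟨(hbound k hk).1,
          show ((List.count k l : Nat) : Int) < (l.length : Int) + 1 by
            have := (hbound k hk).2; omega⟩),
      List.flatMap_assoc]
    apply flatMap_congr_mem
    intro f hf
    rw [buckets_getD (fun x : Int => ((List.count x l : Nat) : Int)) (PySem.Set.ofList l) f]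
    apply flatMap_congr_mem
    intro k hk
    have hkf : ((List.count k l : Nat) : Int) = f := by simpa using (List.mem_filter.1 hk).2
    rw [PySem.List.pyRepeat_singleton]
    congr 1
    omega
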